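-- pv_equiv track=rewrite | github.com/bulbulator228/prigramirovanie | maxOlenKonskayaZalupa/vyz/день 13.py | task_6_58
-- ===== SOURCE A (Python) =====
-- def task_6_58(number):
--     s = str(number)
--     max_digit = max(s)
--     count = 0
--     # Два цикла
--     for ch in s:
--         if ch == max_digit:
--             count += 1
--     return count
-- ===== SOURCE B (Python) =====
-- def task_6_58(number):
--     best = None
--     count = 0
--     for ch in str(number):
--         if best is None or ch > best:
--             best, count = ch, 1
--         elif ch == best:
--             count += 1
--     return count
-- ===== Notes on version B (the rewrite author's own statement) =====
-- stated objective: alternative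
-- what changed: Replaces A's two staged passes (find max of the string, then re-scan counting it) with one single-pass loop maintaining a running (best, count) pair that resets the count whenever a new maximum appears.
import Mathlib
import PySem

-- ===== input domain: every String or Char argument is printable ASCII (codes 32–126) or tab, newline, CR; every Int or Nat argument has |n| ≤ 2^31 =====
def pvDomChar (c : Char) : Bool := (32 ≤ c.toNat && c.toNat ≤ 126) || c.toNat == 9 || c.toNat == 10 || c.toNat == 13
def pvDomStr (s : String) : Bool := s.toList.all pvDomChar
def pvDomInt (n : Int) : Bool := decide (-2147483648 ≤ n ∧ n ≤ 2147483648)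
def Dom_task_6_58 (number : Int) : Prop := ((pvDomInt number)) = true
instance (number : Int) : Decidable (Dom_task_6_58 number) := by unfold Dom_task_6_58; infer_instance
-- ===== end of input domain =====

-- B replaces A's two staged passes (max, then a counting re-scan) with one
-- single-pass loop keeping a running (best, count) pair; same return value.

-- ===== PORT A =====
-- s = str(number); max_digit = max(s); then count occurrences of max_digit in a loop.
-- max() on an empty string would raise, but str(number) is never empty, so the
-- `none` branch of max? is unreachable (0 is an arbitrary value there).
def task_6_58 (number : Int) : Int :=
  let s := (PySem.Int.toStr number).toList
  match PySem.List.max? s (fun c => c) with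
  | none => 0
  | some maxDigit => s.foldl (fun count ch => if ch == maxDigit then count + 1 else count) 0

-- ===== PORT B =====
-- one loop over str(number) with state (best : Option Char, count : Int):
-- a strictly larger char resets (best, count) to (ch, 1); an equal char increments.
def task_6_58_alt (number : Int) : Int :=
  let r := (PySem.Int.toStr number).toList.foldl
    (fun (st : Option Char × Int) ch =>
      match st with
      | (none, _) => (some ch, 1)
      | (some b, c) =>
        if ch > b then (some ch, 1)
        else if ch == b then (some b, c + 1)
        else (some b, c))
    (none, 0)
  r.2

-- ===== PRECONDITION & SPEC =====
def Spec_task_6_58 (number : Int) (out : Int) : Prop := out = task_6_58_alt number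
instance (number : Int) (out : Int) : Decidable (Spec_task_6_58 number out) := by unfold Spec_task_6_58; infer_instance

-- ===== CLAIM (what is proved, stated in full; the proofs are below) =====
def Claim_equal_task_6_58 : Prop := ∀ (number : Int), Dom_task_6_58 number → Spec_task_6_58 number (task_6_58 number)

-- ===== LEMMAS AND PROOFS =====

theorem pv_toDigitsCore_ne_nil (b f n : Nat) (acc : List Char) (h : acc ≠ [] ∨ 0 < f) :
    Nat.toDigitsCore b f n acc ≠ [] := by
  induction f generalizing n acc with
  | zero => simpa [Nat.toDigitsCore] using h.resolve_right (by omega)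
  | succ f ih =>
    simp only [Nat.toDigitsCore]
    split
    · simp
    · exact ih _ _ (Or.inl (by simp))

theorem pv_toStr_toList_ne_nil (n : Int) : (PySem.Int.toStr n).toList ≠ [] := by
  simp only [PySem.Int.toStr, PySem.Int.toChars, String.toList_ofList]
  split_ifs
  · simp
  · exact pv_toDigitsCore_ne_nil _ _ _ _ (Or.inr (by omega))

-- B's loop body
def pvStep (st : Option Char × Int) (ch : Char) : Option Char × Int :=
  match st with
  | (none, _) => (some ch, 1)
  | (some b, c) =>
    if ch > b then (some ch, 1)
    else if ch == b then (some b, c + 1)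
    else (some b, c)

-- invariant of B's loop once best is set: best is the running max, count is
-- the running count of that max (the carried count c survives only if b stays maximal)
theorem pv_loop_some (l : List Char) (b : Char) (c : Int) :
    l.foldl pvStep (some b, c) =
      (some (l.foldl max b),
       (if l.foldl max b = b then c else 0) + (l.count (l.foldl max b) : Int)) := by
  induction l generalizing b c with
  | nil => simp
  | cons x t ih =>
    have hle : ∀ (y : Char) (u : List Char), y ≤ u.foldl max y := by
      intro y u
      induction u generalizing y with
      | nil => simp
      | cons z u ihu => exact le_trans (le_max_left y z) (ihu (max y z))
    simp only [List.foldl_cons]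
    by_cases h1 : x > b
    · have hstep : pvStep (some b, c) x = (some x, 1) := by simp [pvStep, h1]
      rw [hstep, ih]
      have hbx : max b x = x := max_eq_right h1.le
      have hne : t.foldl max x ≠ b := fun hEq =>
        absurd (hEq ▸ hle x t) (not_le.mpr h1)
      by_cases hx : t.foldl max x = x
      · simp [hbx, hx, add_comm]
        exact fun h => absurd h1 (by simp [h])
      · have hxne : (x = t.foldl max x) = False := by
          simp; exact fun h => hx h.symm
        simp [hbx, hx, hxne]
        exact fun h => absurd h hne
    · by_cases h2 : x = b
      · have hstep : pvStep (some b, c) x = (some b, c + 1) := by simp [pvStep, h2]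
        rw [hstep, ih]
        have hbx : max b x = b := by simp [h2]
        by_cases hb : t.foldl max b = b
        · simp [h2, hb]; ring
        · have hxne : (x = t.foldl max b) = False := by
            simp [h2]; exact fun h => hb h.symm
          simp [hbx, hb, hxne]
      · have hlt : x < b := lt_of_le_of_ne (le_of_not_gt h1) h2
        have hstep : pvStep (some b, c) x = (some b, c) := by
          simp [pvStep, h2, h1]
        rw [hstep, ih]
        have hbx : max b x = b := max_eq_left hlt.le
        have hxne : (x = t.foldl max b) = False := by
          simp; intro h
          rw [h] at hlt
          exact absurd (lt_of_le_of_lt (hle b t) hlt) (lt_irrefl _)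
        simp [hbx, hxne]

-- ===== VERDICT (by name: the statement is the Claim_ definition above) =====
theorem task_6_58_spec : Claim_equal_task_6_58 := by
  intro number _
  unfold Spec_task_6_58 task_6_58 task_6_58_alt
  cases hl : (PySem.Int.toStr number).toList with
  | nil => exact absurd hl (pv_toStr_toList_ne_nil number)
  | cons x t =>
    show (match PySem.List.max? (x :: t) (fun c => c) with
      | none => 0
      | some maxDigit => (x :: t).foldl (fun count ch => if ch == maxDigit then count + 1 else count) 0) =
      ((x :: t).foldl pvStep (none, 0)).2
    rw [PySem.List.max?_id_cons]
    simp only [List.foldl_cons]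
    show (x :: t).foldl (fun count ch => if ch == t.foldl max x then count + 1 else count) 0 =
      (t.foldl pvStep (some x, 1)).2
    rw [pv_loop_some, PySem.List.foldl_count_if (fun ch => ch == t.foldl max x)]
    have hle : ∀ (y : Char) (u : List Char), y ≤ u.foldl max y := by
      intro y u
      induction u generalizing y with
      | nil => simp
      | cons z u ihu => exact le_trans (le_max_left y z) (ihu (max y z))
    by_cases hx : t.foldl max x = x
    · simp [hx, List.count, add_comm]
    · have hxne : (x = t.foldl max x) = False := by
        simp; exact fun h => hx h.symm
      simp [hx, hxne, List.count]
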